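-- pv_equiv track=rewrite | github.com/takaiba/ta-2025-zenn-and-google-ai-hackathon | ta-backend-ml/project/app/workers/scenario_generator.py | _clean_selector
-- ===== SOURCE A (Python) =====
-- def _clean_selector(selector: str) -> str:
--     """Clean and validate CSS selector"""
--     # Remove any quotes around the selector
--     selector = selector.strip('"\'')
--
--     # Basic validation
--     if not selector:
--         return "body"
--
--     # Ensure it's a valid CSS selector format
--     invalid_chars = ['<', '>', '{', '}', '|']
--     for char in invalid_chars:
--         selector = selector.replace(char, '')
--
--     return selector
-- ===== SOURCE B (Python) =====
-- def _clean_selector(selector: str) -> str: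
--     """Clean and validate CSS selector"""
--     selector = selector.strip('"\'')
--     if not selector:
--         return "body"
--     invalid = {'<', '>', '{', '}', '|'}
--     return ''.join(c for c in selector if c not in invalid)
-- ===== Notes on version B (the rewrite author's own statement) =====
-- stated objective: idiomatic
-- what changed: Replaces the per-character replace() loop (one full string scan per invalid char) with a single pass that filters characters against a set of invalid chars.
import Mathlib
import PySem

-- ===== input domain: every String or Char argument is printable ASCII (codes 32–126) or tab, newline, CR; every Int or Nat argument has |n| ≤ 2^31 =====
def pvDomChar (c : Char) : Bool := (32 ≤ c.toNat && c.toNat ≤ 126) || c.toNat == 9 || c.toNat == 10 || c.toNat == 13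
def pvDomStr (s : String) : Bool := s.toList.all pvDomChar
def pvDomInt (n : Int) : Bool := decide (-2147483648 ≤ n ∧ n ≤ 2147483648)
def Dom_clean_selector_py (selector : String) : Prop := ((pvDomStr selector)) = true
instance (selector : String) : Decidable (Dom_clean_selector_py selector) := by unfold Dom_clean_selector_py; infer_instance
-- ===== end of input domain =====

-- B: same strip/empty-guard, but a single filtering pass over the characters
-- (membership in the set of invalid chars) instead of one replace() scan per invalid char.


-- ===== PORT A =====
def clean_selector_py (selector : String) : String :=
  let selector := PySem.Str.stripChars selector "\"'"
  if selector = "" then "body"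
  else
    let invalid_chars : List String := ["<", ">", "{", "}", "|"]
    invalid_chars.foldl (fun s ch => PySem.Str.replace s ch "") selector

-- ===== PORT B =====
def clean_selector_py_alt (selector : String) : String :=
  let selector := PySem.Str.stripChars selector "\"'"
  if selector = "" then "body"
  else
    let invalid : PySem.Set Char := PySem.Set.ofList ['<', '>', '{', '}', '|']
    String.ofList (selector.toList.filter (fun c => !(invalid.contains c)))

-- ===== PRECONDITION & SPEC =====
def Spec_clean_selector_py (selector : String) (out : String) : Prop := out = clean_selector_py_alt selector
instance (selector : String) (out : String) : Decidable (Spec_clean_selector_py selector out) := by unfold Spec_clean_selector_py; infer_instance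

-- ===== CLAIM (what is proved, stated in full; the proofs are below) =====
def Claim_equal_clean_selector_py : Prop := ∀ (selector : String), Dom_clean_selector_py selector → Spec_clean_selector_py selector (clean_selector_py selector)

-- ===== LEMMAS AND PROOFS =====

-- replace.go with a one-char pattern and empty replacement (enough fuel) filters that char out
theorem pv_replace_go_single (c : Char) : ∀ (fuel : Nat) (l acc : List Char), l.length ≤ fuel →
    PySem.Chars.replace.go [c] [] fuel l acc = acc.reverse ++ l.filter (fun x => !(x == c)) := by
  intro fuel
  induction fuel with
  | zero =>
    intro l acc h
    have : l = [] := List.eq_nil_of_length_eq_zero (Nat.le_zero.mp h)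
    subst this
    simp [PySem.Chars.replace.go]
  | succ n ih =>
    intro l acc h
    have hlen : ∀ t : List Char, (c' : Char) → l = c' :: t → t.length ≤ n := by
      intro t c' hl; subst hl; simpa using Nat.le_of_succ_le_succ h
    cases l with
    | nil => simp [PySem.Chars.replace.go]
    | cons x t =>
      by_cases hx : x = c
      · subst hx
        simp only [PySem.Chars.replace.go]
        rw [if_pos (by simp [List.isPrefixOf])]
        simp only [List.length_singleton, List.drop_succ_cons, List.drop_zero,
          List.reverse_nil, List.nil_append]
        rw [ih t acc (hlen t x rfl)]
        simp
      · simp only [PySem.Chars.replace.go]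
        rw [if_neg (by simp only [List.isPrefixOf, Bool.and_eq_true, beq_iff_eq]; exact fun hh => hx hh.1.symm)]
        rw [ih t (x :: acc) (hlen t x rfl)]
        have : (x == c) = false := by simp [hx]
        simp [this]

theorem pv_replace_single (l : List Char) (c : Char) :
    PySem.Chars.replace l [c] [] = l.filter (fun x => !(x == c)) := by
  simp only [PySem.Chars.replace, List.isEmpty]
  rw [if_neg (by simp)]
  simpa using pv_replace_go_single c l.length l [] (le_refl _)

theorem pv_str_replace_single (s ch : String) (c : Char) (hch : ch.toList = [c]) :
    PySem.Str.replace s ch "" = String.ofList (s.toList.filter (fun x => !(x == c))) := by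
  unfold PySem.Str.replace
  rw [hch]
  congr 1
  have he : ("" : String).toList = [] := rfl
  rw [he, pv_replace_single]

-- ===== VERDICT (by name: the statement is the Claim_ definition above) =====
theorem clean_selector_py_spec : Claim_equal_clean_selector_py := by
  intro selector _
  unfold Spec_clean_selector_py clean_selector_py clean_selector_py_alt
  set t := PySem.Str.stripChars selector "\"'" with ht
  by_cases h : t = ""
  · simp [h]
  · simp only [if_neg h, List.foldl]
    rw [pv_str_replace_single _ _ '|' rfl, pv_str_replace_single _ _ '}' rfl,
        pv_str_replace_single _ _ '{' rfl, pv_str_replace_single _ _ '>' rfl,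
        pv_str_replace_single _ _ '<' rfl]
    refine congrArg String.ofList ?_
    simp only [String.toList_ofList, List.filter_filter]
    apply List.filter_congr
    intro c _
    simp only [PySem.Set.ofList, PySem.Set.contains, List.contains_cons,
      List.contains_nil, Bool.not_or]
    by_cases h1 : c = '<' <;> by_cases h2 : c = '>' <;> by_cases h3 : c = '{' <;>
      by_cases h4 : c = '}' <;> by_cases h5 : c = '|' <;> simp [h1, h2, h3, h4, h5]
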